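-- pv_equiv track=rewrite | github.com/StrahR/ProjectEuler | 054.py | three_of_a_kind
-- ===== SOURCE A (Python) =====
-- Card = str
--
-- Hand = list
--
-- mult = 10**(2*5)
--
-- def card_value(c: Card) -> int:
--     n = c[0]
--     # if n == 'A':
--     if n == 'e':
--         return 14
--     # if n == 'K':
--     if n == 'd':
--         return 13
--     # if n == 'Q':
--     if n == 'c':
--         return 12
--     # if n == 'J':
--     if n == 'b':
--         return 11
--     # if n == 'T':
--     if n == 'a':
--         return 10
--     return int(n)
--
-- def high_card(hand: Hand) -> int:
--     score = 0
--     for c in hand: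
--         score = max(score, card_value(c))
--     return score
--
-- def three_of_a_kind(hand: Hand) -> int:
--     for i in range(2, len(hand)):
--         for j in range(1, i):
--             for k in range(j):
--                 if card_value(hand[i]) == card_value(hand[j]) == card_value(hand[k]):
--                     v = card_value(hand[i])
--                     del hand[i]
--                     del hand[j]
--                     del hand[k]
--                     return 3*mult + 100*v + high_card(hand)
--     return 0
-- ===== SOURCE B (Python) =====
-- # B: single left-to-right pass keeping card_value -> list of indices; first value to
-- # reach 3 occurrences is the triple (same triple A's nested scan finds); same in-place
-- # deletion of the three indices as A.
-- Card = str
-- Hand = list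
-- mult = 10**(2*5)
--
-- def card_value(c: Card) -> int:
--     n = c[0]
--     if n == 'e':
--         return 14
--     if n == 'd':
--         return 13
--     if n == 'c':
--         return 12
--     if n == 'b':
--         return 11
--     if n == 'a':
--         return 10
--     return int(n)
--
-- def high_card(hand: Hand) -> int:
--     score = 0
--     for c in hand:
--         score = max(score, card_value(c))
--     return score
--
-- def three_of_a_kind(hand: Hand) -> int:
--     if len(hand) < 3:
--         return 0
--     seen = {}
--     for idx, c in enumerate(hand):
--         v = card_value(c)
--         lst = seen.setdefault(v, [])
--         lst.append(idx)
--         if len(lst) == 3: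
--             for i in reversed(lst):
--                 del hand[i]
--             return 3*mult + 100*v + high_card(hand)
--     return 0
-- ===== Notes on version B (the rewrite author's own statement) =====
-- stated objective: simpler
-- what changed: Replaces A's O(n^3) triple-nested index scan with a single left-to-right pass maintaining a dict card_value -> indices seen; the first value whose index list reaches length 3 is exactly the triple A's nested loops find (same three indices deleted, same score).
-- outside the precondition, e.g. on three_of_a_kind(['!', '2', '3']): A returns 0, B raises ValueError
import Mathlib
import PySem

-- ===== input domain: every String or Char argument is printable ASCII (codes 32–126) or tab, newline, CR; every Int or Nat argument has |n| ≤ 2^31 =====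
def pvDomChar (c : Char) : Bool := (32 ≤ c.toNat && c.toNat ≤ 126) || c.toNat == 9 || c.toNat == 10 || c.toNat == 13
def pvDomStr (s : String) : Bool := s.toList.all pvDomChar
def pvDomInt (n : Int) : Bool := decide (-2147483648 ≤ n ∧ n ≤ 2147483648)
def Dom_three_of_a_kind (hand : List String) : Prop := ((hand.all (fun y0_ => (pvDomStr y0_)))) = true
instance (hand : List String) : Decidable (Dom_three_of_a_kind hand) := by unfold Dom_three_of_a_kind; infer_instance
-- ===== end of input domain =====

-- B replaces A's triple-nested index scan by one pass with a value -> indices dict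
-- (objective: simpler); both mutate the Python hand identically, the theorems are
-- about the return value.

-- ===== PORT A =====
def mult : Int := 10 ^ (2 * 5)

def cardValue (c : String) : Int :=
  match PySem.Str.pyGet? c 0 with
  | none => 0   -- c[0] IndexError: excluded by Pre_
  | some n =>
    if n = 'e' then 14
    else if n = 'd' then 13
    else if n = 'c' then 12
    else if n = 'b' then 11
    else if n = 'a' then 10
    else (PySem.Int.ofStr? (String.ofList [n])).getD 0   -- int(n) ValueError: excluded by Pre_

def high_card (hand : List String) : Int :=
  hand.foldl (fun score c => max score (cardValue c)) 0

-- the k-loop / j-loop / i-loop of A, with early return = find?/findSome?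
def innerJK (hand : List String) (i : Nat) : Option (Nat × Nat × Nat) :=
  (List.range' 1 (i - 1)).findSome? (fun j =>
    ((List.range j).find? (fun k =>
        decide (cardValue (hand.getD i "") = cardValue (hand.getD j "") ∧
                cardValue (hand.getD j "") = cardValue (hand.getD k "")))).map
      (fun k => (i, j, k)))

def three_of_a_kind (hand : List String) : Int :=
  match (List.range' 2 (hand.length - 2)).findSome? (fun i => innerJK hand i) with
  | some (i, j, k) =>
      3 * mult + 100 * cardValue (hand.getD i "") +
        high_card (((hand.eraseIdx i).eraseIdx j).eraseIdx k)
  | none => 0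

-- ===== PORT B =====
-- one pass over hand: seen maps a card value to the (ascending) indices seen so far
def scanB (hand : List String) : List String → Nat → PySem.Dict Int (List Nat) → Int
  | [], _, _ => 0
  | c :: rest, idx, seen =>
    let v := cardValue c
    let lst := seen.getD v [] ++ [idx]
    if lst.length = 3 then
      3 * mult + 100 * v +
        high_card (lst.reverse.foldl (fun h i => h.eraseIdx i) hand)
    else scanB hand rest (idx + 1) (seen.insert v lst)

def three_of_a_kind_alt (hand : List String) : Int :=
  if hand.length < 3 then 0
  else scanB hand hand 0 PySem.Dict.empty

-- ===== PRECONDITION & SPEC =====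
def validCard (c : String) : Bool :=
  match c.toList with
  | [] => false
  | n :: _ => n = 'a' || n = 'b' || n = 'c' || n = 'd' || n = 'e' || n.isDigit

-- Pre_ excludes hands of length ≥ 3 containing a card that is empty or whose first
-- character is neither a digit nor one of 'a'..'e': card_value raises there
-- (IndexError/ValueError) on every card A evaluates; only when such a card sits at
-- index 0 and its value is never compared does A still return 0, and B (which
-- evaluates every card) raises instead.
def Pre_three_of_a_kind (hand : List String) : Prop :=
  hand.length < 3 ∨ ∀ c ∈ hand, validCard c = true
instance (hand : List String) : Decidable (Pre_three_of_a_kind hand) := by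
  unfold Pre_three_of_a_kind; infer_instance

def pvWitness_three_of_a_kind : List String := ["2h", "7d", "2s", "5c", "2c"]

def Spec_three_of_a_kind (hand : List String) (out : Int) : Prop := out = three_of_a_kind_alt hand
instance (hand : List String) (out : Int) : Decidable (Spec_three_of_a_kind hand out) := by unfold Spec_three_of_a_kind; infer_instance

-- ===== CLAIM (what is proved, stated in full; the proofs are below) =====
def Claim_equal_three_of_a_kind : Prop := ∀ (hand : List String), Dom_three_of_a_kind hand → Pre_three_of_a_kind hand → Spec_three_of_a_kind hand (three_of_a_kind hand)

-- ===== LEMMAS AND PROOFS =====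

-- value of the card at index t (A reads it via hand[t], B via the traversed element)
def cv (hand : List String) (t : Nat) : Int := cardValue (hand.getD t "")

-- indices < m holding value v
def occs (hand : List String) (v : Int) (m : Nat) : List Nat :=
  (List.range m).filter (fun t => cv hand t == v)

lemma mem_occs {hand : List String} {v : Int} {m t : Nat} :
    t ∈ occs hand v m ↔ t < m ∧ cv hand t = v := by
  simp [occs, List.mem_filter, List.mem_range]

lemma occs_pairwise (hand : List String) (v : Int) (m : Nat) :
    (occs hand v m).Pairwise (· < ·) := by
  exact (List.pairwise_lt_range (n := m)).filter _

lemma occs_nodup (hand : List String) (v : Int) (m : Nat) :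
    (occs hand v m).Nodup := by
  exact (occs_pairwise hand v m).imp (fun h => Nat.ne_of_lt h)

lemma occs_succ (hand : List String) (v : Int) (m : Nat) :
    occs hand v (m + 1) =
      occs hand v m ++ (if cv hand m = v then [m] else []) := by
  simp [occs, List.range_succ, List.filter_append]
  split_ifs with h <;> simp [h]

lemma two_le_length_of_mem {l : List Nat} (hnd : l.Nodup) {a b : Nat}
    (ha : a ∈ l) (hb : b ∈ l) (hne : a ≠ b) : 2 ≤ l.length := by
  match l with
  | [] => simp at ha
  | [x] => simp at ha hb; omega
  | x :: y :: t => simp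

lemma find?_range'_first {p : Nat → Bool} {i : Nat} (hp : p i = true) :
    ∀ len a, a ≤ i → i < a + len → (∀ t, a ≤ t → t < i → p t = false) →
      (List.range' a len).find? p = some i := by
  intro len
  induction len with
  | zero => intro a h1 h2 _; omega
  | succ n ih =>
    intro a h1 h2 hnone
    rw [List.range'_succ]
    by_cases hai : a = i
    · subst hai; exact List.find?_cons_of_pos hp
    · have hpa : p a = false := hnone a le_rfl (by omega)
      rw [List.find?_cons_of_neg (by simp [hpa])]
      exact ih (a + 1) (by omega) (by omega) (fun t ht1 ht2 => hnone t (by omega) ht2)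

lemma findSome?_range'_first {β : Type} {f : Nat → Option β} {i : Nat} {b : β}
    (hf : f i = some b) :
    ∀ len a, a ≤ i → i < a + len → (∀ t, a ≤ t → t < i → f t = none) →
      (List.range' a len).findSome? f = some b := by
  intro len
  induction len with
  | zero => intro a h1 h2 _; omega
  | succ n ih =>
    intro a h1 h2 hnone
    rw [List.range'_succ]
    by_cases hai : a = i
    · subst hai
      rw [List.findSome?_cons, hf]
    · have hfa : f a = none := hnone a le_rfl (by omega)
      rw [List.findSome?_cons, hfa]
      exact ih (a + 1) (by omega) (by omega) (fun t ht1 ht2 => hnone t (by omega) ht2)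

lemma innerJK_none {hand : List String} {i : Nat}
    (h : (occs hand (cv hand i) i).length ≤ 1) : innerJK hand i = none := by
  unfold innerJK
  rw [List.findSome?_eq_none_iff]
  intro j hj
  rw [Option.map_eq_none_iff, List.find?_eq_none]
  intro k hk hpk
  rw [List.mem_range'_1] at hj
  rw [List.mem_range] at hk
  simp only [decide_eq_true_eq] at hpk
  obtain ⟨e1, e2⟩ := hpk
  have hji : j ∈ occs hand (cv hand i) i := mem_occs.mpr ⟨by omega, e1.symm⟩
  have hki : k ∈ occs hand (cv hand i) i :=
    mem_occs.mpr ⟨by omega, (e1.trans e2).symm⟩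
  have := two_le_length_of_mem (occs_nodup hand (cv hand i) i) hji hki (by omega)
  omega

lemma innerJK_some {hand : List String} {i k0 j0 : Nat}
    (hocc : occs hand (cv hand i) i = [k0, j0]) :
    innerJK hand i = some (i, j0, k0) := by
  have hpw := occs_pairwise hand (cv hand i) i
  rw [hocc] at hpw
  have hk0j0 : k0 < j0 := by
    rcases List.pairwise_cons.mp hpw with ⟨h, _⟩; exact h j0 (by simp)
  have hmem : ∀ t, t ∈ occs hand (cv hand i) i ↔ t = k0 ∨ t = j0 := by
    intro t; rw [hocc]; simp
  have hj0 : j0 < i ∧ cv hand j0 = cv hand i := mem_occs.mp ((hmem j0).mpr (Or.inr rfl))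
  have hk0 : k0 < i ∧ cv hand k0 = cv hand i := mem_occs.mp ((hmem k0).mpr (Or.inl rfl))
  have hp : (fun k => decide (cardValue (hand.getD i "") = cardValue (hand.getD j0 "") ∧
        cardValue (hand.getD j0 "") = cardValue (hand.getD k ""))) k0 = true := by
    simp only [decide_eq_true_eq]
    exact ⟨hj0.2.symm, hj0.2.trans hk0.2.symm⟩
  have hf : (List.range j0).find? (fun k =>
      decide (cardValue (hand.getD i "") = cardValue (hand.getD j0 "") ∧
              cardValue (hand.getD j0 "") = cardValue (hand.getD k ""))) = some k0 := by
    rw [List.range_eq_range']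
    apply find?_range'_first hp j0 0 (by omega) (by omega)
    intro t _ htk0
    simp only [decide_eq_false_iff_not, not_and]
    intro e1 e2
    have : t ∈ occs hand (cv hand i) i :=
      mem_occs.mpr ⟨by omega, (e1.trans e2).symm⟩
    rcases (hmem t).mp this with rfl | rfl <;> omega
  have hfj0 : (fun j => ((List.range j).find? (fun k =>
      decide (cardValue (hand.getD i "") = cardValue (hand.getD j "") ∧
              cardValue (hand.getD j "") = cardValue (hand.getD k "")))).map
      (fun k => (i, j, k))) j0 = some (i, j0, k0) := by
    simp only
    rw [hf]
    rfl
  unfold innerJK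
  apply findSome?_range'_first hfj0 (i - 1) 1 (by omega) (by omega)
  intro j hj1 hjlt
  rw [Option.map_eq_none_iff, List.find?_eq_none]
  intro k hk hpk
  rw [List.mem_range] at hk
  simp only [decide_eq_true_eq] at hpk
  obtain ⟨e1, e2⟩ := hpk
  have hjm : j ∈ occs hand (cv hand i) i := mem_occs.mpr ⟨by omega, e1.symm⟩
  rcases (hmem j).mp hjm with rfl | rfl
  · have hkm : k ∈ occs hand (cv hand i) i :=
      mem_occs.mpr ⟨by omega, (e1.trans e2).symm⟩
    rcases (hmem k).mp hkm with rfl | rfl <;> omega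
  · omega

-- no value has had its third occurrence strictly before m → occurrence count below
-- any processed index stays ≤ 1
lemma occs_le_one_step {hand : List String} {m : Nat}
    (hprev : ∀ t, t < m → (occs hand (cv hand t) t).length ≤ 1)
    (hne : (occs hand (cv hand m) m).length ≠ 2) :
    (occs hand (cv hand m) m).length ≤ 1 := by
  by_contra hgt
  have h3 : 3 ≤ (occs hand (cv hand m) m).length := by omega
  obtain ⟨a, b, c, t, habc⟩ : ∃ a b c t, occs hand (cv hand m) m = a :: b :: c :: t := by
    match hl : occs hand (cv hand m) m with
    | [] => rw [hl] at h3; simp at h3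
    | [x] => rw [hl] at h3; simp at h3
    | [x, y] => rw [hl] at h3; simp at h3
    | x :: y :: z :: t => exact ⟨x, y, z, t, rfl⟩
  have hpw := occs_pairwise hand (cv hand m) m
  rw [habc] at hpw
  have hab : a < b := by
    rcases List.pairwise_cons.mp hpw with ⟨h, _⟩; exact h b (by simp)
  have hbc : b < c := by
    rcases List.pairwise_cons.mp hpw with ⟨_, h⟩
    rcases List.pairwise_cons.mp h with ⟨h2, _⟩; exact h2 c (by simp)
  have hac : a < c := lt_trans hab hbc
  have hcm : c ∈ occs hand (cv hand m) m := by rw [habc]; simp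
  have ham : a ∈ occs hand (cv hand m) m := by rw [habc]; simp
  have hbm : b ∈ occs hand (cv hand m) m := by rw [habc]; simp
  have hcv : cv hand c = cv hand m := (mem_occs.mp hcm).2
  have hclt : c < m := (mem_occs.mp hcm).1
  have ha' : a ∈ occs hand (cv hand c) c :=
    mem_occs.mpr ⟨hac, by rw [hcv]; exact (mem_occs.mp ham).2⟩
  have hb' : b ∈ occs hand (cv hand c) c :=
    mem_occs.mpr ⟨hbc, by rw [hcv]; exact (mem_occs.mp hbm).2⟩
  have := two_le_length_of_mem (occs_nodup hand (cv hand c) c) ha' hb' (by omega)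
  have := hprev c hclt
  omega

lemma scan_main (hand : List String) :
    ∀ rest idx (seen : PySem.Dict Int (List Nat)), rest = hand.drop idx →
      idx ≤ hand.length →
      (∀ v, seen.getD v [] = occs hand v idx) →
      (∀ t, t < idx → (occs hand (cv hand t) t).length ≤ 1) →
      scanB hand rest idx seen = three_of_a_kind hand := by
  intro rest
  induction rest with
  | nil =>
    intro idx seen hdrop hle _hseen hprev
    have hidx : idx = hand.length := by
      have := List.drop_eq_nil_iff.mp hdrop.symm
      omega
    show (0 : Int) = three_of_a_kind hand
    unfold three_of_a_kind
    have hnone : (List.range' 2 (hand.length - 2)).findSome? (fun i => innerJK hand i) = none := by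
      rw [List.findSome?_eq_none_iff]
      intro i hi
      rw [List.mem_range'_1] at hi
      exact innerJK_none (hprev i (by omega))
    rw [hnone]
  | cons c rest' ih =>
    intro idx seen hdrop hle hseen hprev
    have hlt : idx < hand.length := by
      by_contra h
      rw [List.drop_eq_nil_iff.mpr (by omega)] at hdrop
      simp at hdrop
    have hc : c = hand.getD idx "" := by
      have h0 : hand[idx]? = some c := by
        have h := congrArg (fun l => l[0]?) hdrop.symm
        simpa [List.getElem?_drop] using h
      simp [List.getD_eq_getElem?_getD, h0]
    have hrest' : rest' = hand.drop (idx + 1) := by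
      have : (hand.drop idx).tail = hand.drop (idx + 1) := by
        rw [← List.drop_drop]; simp
      rw [← this, ← hdrop]
      rfl
    show scanB hand (c :: rest') idx seen = three_of_a_kind hand
    rw [scanB]
    have hcv : cardValue c = cv hand idx := by rw [hc]; rfl
    have hlst : seen.getD (cardValue c) [] ++ [idx] = occs hand (cardValue c) (idx + 1) := by
      rw [hseen, occs_succ]
      rw [hcv]
      simp
    by_cases h3 : (seen.getD (cardValue c) [] ++ [idx]).length = 3
    · simp only [h3, if_pos]
      have hocc2 : (occs hand (cv hand idx) idx).length = 2 := by
        rw [← hcv, ← hseen (cardValue c)]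
        have h3' := h3
        simp [List.length_append] at h3'
        omega
      obtain ⟨k0, j0, hkj⟩ : ∃ k0 j0, occs hand (cv hand idx) idx = [k0, j0] := by
        match hl : occs hand (cv hand idx) idx with
        | [] => rw [hl] at hocc2; simp at hocc2
        | [x] => rw [hl] at hocc2; simp at hocc2
        | [x, y] => exact ⟨x, y, rfl⟩
        | x :: y :: z :: t => rw [hl] at hocc2; simp at hocc2
      have hpw := occs_pairwise hand (cv hand idx) idx
      rw [hkj] at hpw
      have hk0j0 : k0 < j0 := by
        rcases List.pairwise_cons.mp hpw with ⟨h, _⟩; exact h j0 (by simp)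
      have hj0 : j0 < idx := (mem_occs.mp (by rw [hkj]; simp : j0 ∈ occs hand (cv hand idx) idx)).1
      have hlst' : seen.getD (cardValue c) [] ++ [idx] = [k0, j0, idx] := by
        rw [hseen, hcv, hkj]
        rfl
      have hA : (List.range' 2 (hand.length - 2)).findSome? (fun i => innerJK hand i) = some (idx, j0, k0) := by
        apply findSome?_range'_first (innerJK_some hkj) (hand.length - 2) 2 (by omega) (by omega)
        intro t ht2 htidx
        exact innerJK_none (hprev t htidx)
      unfold three_of_a_kind
      rw [hA]
      rw [hlst', hcv]
      show 3 * mult + 100 * cv hand idx +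
          high_card (((hand.eraseIdx idx).eraseIdx j0).eraseIdx k0) = _
      rfl
    · simp only [h3, if_false]
      have hocc_ne : (occs hand (cv hand idx) idx).length ≠ 2 := by
        rw [← hcv, ← hseen (cardValue c)]
        intro h2
        apply h3
        simp [List.length_append, h2]
      have hle1 := occs_le_one_step hprev hocc_ne
      apply ih (idx + 1) _ hrest' (by omega)
      · intro v
        by_cases hv : v = cardValue c
        · subst hv
          rw [PySem.Dict.getD_insert_self, hlst]
        · rw [PySem.Dict.getD_insert_of_ne seen _ _ hv, hseen, occs_succ]
          have : ¬ (cv hand idx = v) := by rw [← hcv]; exact fun h => hv h.symm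
          simp [this]
      · intro t ht
        by_cases htidx : t = idx
        · subst htidx; exact hle1
        · exact hprev t (by omega)

-- ===== VERDICT (by name: the statement is the Claim_ definition above) =====
theorem three_of_a_kind_spec : Claim_equal_three_of_a_kind := by
  intro hand _hdom _hpre
  show three_of_a_kind hand = three_of_a_kind_alt hand
  unfold three_of_a_kind_alt
  by_cases hlen : hand.length < 3
  · simp only [hlen, if_pos]
    unfold three_of_a_kind
    have h : hand.length - 2 = 0 := by omega
    rw [h]
    rfl
  · simp only [hlen, if_false]
    refine (scan_main hand hand 0 PySem.Dict.empty rfl (by omega) ?_ ?_).symm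
    · intro v; simp [occs]
    · intro t ht; omega
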